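-- pv_equiv track=rewrite | github.com/adriangalende/ejerciciosPython | Zero-Balanced-Array.py | is_zero_balanced
-- ===== SOURCE A (Python) =====
-- def is_zero_balanced(arr):
--     sum = 0
--     existNegative = False
--     for i in arr:
--         sum += i
--         for j in arr:
--             if j == ( -i ):
--                 existNegative = True
--                 break
--
--
--     if sum == 0 and existNegative:
--         return True
--     else:
--         return False
-- ===== SOURCE B (Python) =====
-- def is_zero_balanced(arr):
--     s = sorted(arr)
--     found = False
--     l, r = 0, len(s) - 1
--     while l <= r:
--         t = s[l] + s[r]
--         if t == 0:
--             found = True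
--             break
--         if t < 0:
--             l += 1
--         else:
--             r -= 1
--     return sum(arr) == 0 and found
-- ===== Notes on version B (the rewrite author's own statement) =====
-- stated objective: faster
-- what changed: Replaced the quadratic nested scan (for each element, scan the whole array for its negation) by sort + two-pointer zero-sum-pair detection on a sorted copy, with the total computed in one pass.
import Mathlib
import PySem

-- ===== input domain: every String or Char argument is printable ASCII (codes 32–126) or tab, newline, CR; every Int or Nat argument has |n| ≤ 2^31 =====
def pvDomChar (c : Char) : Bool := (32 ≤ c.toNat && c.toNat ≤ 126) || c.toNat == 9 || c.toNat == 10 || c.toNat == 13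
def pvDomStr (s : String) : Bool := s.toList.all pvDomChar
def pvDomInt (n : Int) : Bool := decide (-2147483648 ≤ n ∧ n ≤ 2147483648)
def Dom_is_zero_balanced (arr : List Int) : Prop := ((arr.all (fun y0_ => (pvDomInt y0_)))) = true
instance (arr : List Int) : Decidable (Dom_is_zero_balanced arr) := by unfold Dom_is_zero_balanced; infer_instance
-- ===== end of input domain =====

-- B replaces A's quadratic nested scan by sort + two-pointer pair detection (measured faster at large sizes).

-- ===== PORT A =====
-- inner loop 'for j in arr: if j == -i: existNegative = True; break'
def pvInnerA (i : Int) : List Int → Bool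
  | [] => false
  | j :: rest => if j = -i then true else pvInnerA i rest

def is_zero_balanced (arr : List Int) : Bool :=
  let st := arr.foldl (fun (st : Int × Bool) i =>
    (st.1 + i, if pvInnerA i arr then true else st.2)) (0, false)
  if st.1 = 0 ∧ st.2 = true then true else false

-- ===== PORT B =====
-- 'while l <= r: t = s[l] + s[r]; …' (0 ≤ l ≤ r < len s at every call from is_zero_balanced_alt)
def pvTwoPtr (s : List Int) (l r : Int) : Bool :=
  if _h : l ≤ r then
    let t := PySem.List.pyGetD s l 0 + PySem.List.pyGetD s r 0
    if t = 0 then true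
    else if t < 0 then pvTwoPtr s (l + 1) r
    else pvTwoPtr s l (r - 1)
  else false
termination_by (r + 1 - l).toNat
decreasing_by all_goals omega

def is_zero_balanced_alt (arr : List Int) : Bool :=
  let s := PySem.List.sorted arr (fun x => x) false
  let found := pvTwoPtr s 0 ((s.length : Int) - 1)
  decide (arr.sum = 0) && found

-- ===== PRECONDITION & SPEC =====
def Spec_is_zero_balanced (arr : List Int) (out : Bool) : Prop := out = is_zero_balanced_alt arr
instance (arr : List Int) (out : Bool) : Decidable (Spec_is_zero_balanced arr out) := by unfold Spec_is_zero_balanced; infer_instance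

-- ===== CLAIM (what is proved, stated in full; the proofs are below) =====
def Claim_equal_is_zero_balanced : Prop := ∀ (arr : List Int), Dom_is_zero_balanced arr → Spec_is_zero_balanced arr (is_zero_balanced arr)

-- ===== LEMMAS AND PROOFS =====

-- "there is a zero-sum pair at positions l ≤ i ≤ j ≤ r"
def pvHasPair (s : List Int) (l r : Int) : Prop :=
  ∃ i j : Nat, l ≤ (i : Int) ∧ i ≤ j ∧ (j : Int) ≤ r ∧ j < s.length ∧
    s.getD i 0 + s.getD j 0 = 0

lemma pvInnerA_eq_any (i : Int) (ys : List Int) :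
    pvInnerA i ys = ys.any (fun j => decide (j = -i)) := by
  induction ys with
  | nil => rfl
  | cons j rest ih => by_cases h : j = -i <;> simp [pvInnerA, h, ih]

lemma pvFoldA (arr : List Int) : ∀ (xs : List Int) (s0 : Int) (b0 : Bool),
    xs.foldl (fun (st : Int × Bool) i =>
      (st.1 + i, if pvInnerA i arr then true else st.2)) (s0, b0)
    = (s0 + xs.sum, b0 || xs.any (fun i => pvInnerA i arr)) := by
  intro xs
  induction xs with
  | nil => intro s0 b0; simp
  | cons x rest ih =>
    intro s0 b0
    simp only [List.foldl_cons, List.sum_cons, List.any_cons, ih, Prod.mk.injEq]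
    refine ⟨by ring, ?_⟩
    by_cases h : pvInnerA x arr <;> simp [h]

lemma pvAny_eq (arr : List Int) :
    (arr.any (fun i => pvInnerA i arr)) = decide (∃ x ∈ arr, (-x) ∈ arr) := by
  simp only [pvInnerA_eq_any]
  rw [Bool.eq_iff_iff]
  simp only [List.any_eq_true, decide_eq_true_eq]
  constructor
  · rintro ⟨i, hi, j, hj, hji⟩
    exact ⟨i, hi, hji ▸ hj⟩
  · rintro ⟨x, hx, hnx⟩
    exact ⟨x, hx, -x, hnx, rfl⟩

lemma pvA_char (arr : List Int) :
    is_zero_balanced arr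
      = (decide (arr.sum = 0) && decide (∃ x ∈ arr, (-x) ∈ arr)) := by
  unfold is_zero_balanced
  rw [pvFoldA arr arr 0 false]
  simp only [Bool.false_or, zero_add, pvAny_eq]
  by_cases h1 : arr.sum = 0 <;>
    by_cases h2 : ∃ x ∈ arr, (-x) ∈ arr <;>
      simp [h1, h2]

lemma pvGetD_mono (s : List Int) (hs : s.Pairwise (· ≤ ·)) {i j : Nat}
    (hij : i ≤ j) (hj : j < s.length) : s.getD i 0 ≤ s.getD j 0 := by
  rcases lt_or_eq_of_le hij with h | h
  · have hi : i < s.length := lt_trans h hj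
    have := (List.pairwise_iff_getElem.mp hs) i j hi hj h
    rw [List.getD_eq_getElem _ _ hi, List.getD_eq_getElem _ _ hj]
    exact this
  · subst h; exact le_refl _

lemma pvTwoPtr_iff (s : List Int) (hs : s.Pairwise (· ≤ ·)) :
    ∀ (n : Nat) (l r : Int), (r + 1 - l).toNat ≤ n → 0 ≤ l → r < (s.length : Int) →
      (pvTwoPtr s l r = true ↔ pvHasPair s l r) := by
  intro n
  induction n with
  | zero =>
    intro l r hn hl hr
    rw [pvTwoPtr, dif_neg (by omega : ¬ l ≤ r)]
    simp only [Bool.false_eq_true, false_iff]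
    rintro ⟨i, j, h1, h2, h3, _, _⟩; omega
  | succ n ih =>
    intro l r hn hl hr
    by_cases hlr : l ≤ r
    · have hlN : l.toNat < s.length := by omega
      have hrN : r.toNat < s.length := by omega
      have hgl : PySem.List.pyGetD s l 0 = s.getD l.toNat 0 := by
        rw [PySem.List.pyGetD_eq_getElem s 0 hl (by omega)]
        exact (List.getD_eq_getElem _ _ hlN).symm
      have hgr : PySem.List.pyGetD s r 0 = s.getD r.toNat 0 := by
        rw [PySem.List.pyGetD_eq_getElem s 0 (by omega) (by omega)]
        exact (List.getD_eq_getElem _ _ hrN).symm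
      rw [pvTwoPtr, dif_pos hlr]
      simp only [hgl, hgr]
      by_cases h0 : s.getD l.toNat 0 + s.getD r.toNat 0 = 0
      · simp only [if_pos h0]
        constructor
        · intro _
          exact ⟨l.toNat, r.toNat, by omega, by omega, by omega, hrN, h0⟩
        · intro _; trivial
      · simp only [if_neg h0]
        by_cases hneg : s.getD l.toNat 0 + s.getD r.toNat 0 < 0
        · simp only [if_pos hneg]
          rw [ih (l + 1) r (by omega) (by omega) hr]
          constructor
          · rintro ⟨i, j, h1, h2, h3, h4, h5⟩
            exact ⟨i, j, by omega, h2, h3, h4, h5⟩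
          · rintro ⟨i, j, h1, h2, h3, h4, h5⟩
            refine ⟨i, j, ?_, h2, h3, h4, h5⟩
            -- i cannot be l: s[l] + s[j] ≤ s[l] + s[r] < 0
            by_contra hc
            have hil : (i : Int) = l := by omega
            have hjr : s.getD j 0 ≤ s.getD r.toNat 0 :=
              pvGetD_mono s hs (by omega) hrN
            have : s.getD i 0 = s.getD l.toNat 0 := by
              congr 1; omega
            omega
        · simp only [if_neg hneg]
          rw [ih l (r - 1) (by omega) hl (by omega)]
          constructor
          · rintro ⟨i, j, h1, h2, h3, h4, h5⟩
            exact ⟨i, j, h1, h2, by omega, h4, h5⟩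
          · rintro ⟨i, j, h1, h2, h3, h4, h5⟩
            refine ⟨i, j, h1, h2, ?_, h4, h5⟩
            -- j cannot be r: s[i] + s[r] ≥ s[l] + s[r] > 0
            by_contra hc
            have hjr : (j : Int) = r := by omega
            have hli : s.getD l.toNat 0 ≤ s.getD i 0 :=
              pvGetD_mono s hs (by omega) (by omega)
            have : s.getD j 0 = s.getD r.toNat 0 := by
              congr 1; omega
            omega
    · rw [pvTwoPtr, dif_neg hlr]
      simp only [Bool.false_eq_true, false_iff]
      rintro ⟨i, j, h1, h2, h3, _, _⟩; omega

lemma pvHasPair_iff_mem (s : List Int) :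
    pvHasPair s 0 ((s.length : Int) - 1) ↔ ∃ x ∈ s, (-x) ∈ s := by
  constructor
  · rintro ⟨i, j, _, hij, hjr, hj, hsum⟩
    have hi : i < s.length := lt_of_le_of_lt hij hj
    refine ⟨s.getD i 0, ?_, ?_⟩
    · rw [List.getD_eq_getElem _ _ hi]; exact List.getElem_mem hi
    · have : s.getD j 0 = -(s.getD i 0) := by omega
      rw [← this, List.getD_eq_getElem _ _ hj]; exact List.getElem_mem hj
  · rintro ⟨x, hx, hnx⟩
    obtain ⟨p, hp, hxp⟩ := List.getElem_of_mem hx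
    obtain ⟨q, hq, hxq⟩ := List.getElem_of_mem hnx
    rcases le_total p q with h | h
    · exact ⟨p, q, by omega, h, by omega, hq,
        by rw [List.getD_eq_getElem _ _ (by omega), List.getD_eq_getElem _ _ hq, hxp, hxq]; ring⟩
    · exact ⟨q, p, by omega, h, by omega, hp,
        by rw [List.getD_eq_getElem _ _ (by omega), List.getD_eq_getElem _ _ hp, hxq, hxp]; ring⟩

lemma pvB_char (arr : List Int) :
    is_zero_balanced_alt arr
      = (decide (arr.sum = 0) && decide (∃ x ∈ arr, (-x) ∈ arr)) := by
  unfold is_zero_balanced_alt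
  set s := PySem.List.sorted arr (fun x => x) false with hsdef
  have hs : s.Pairwise (· ≤ ·) := PySem.List.sorted_pairwise arr (fun x => x) 
  have hfound : pvTwoPtr s 0 ((s.length : Int) - 1) = true ↔ ∃ x ∈ s, (-x) ∈ s := by
    rw [pvTwoPtr_iff s hs s.length 0 ((s.length : Int) - 1) (by omega) (by omega) (by omega)]
    exact pvHasPair_iff_mem s
  have hmem : (∃ x ∈ s, (-x) ∈ s) ↔ ∃ x ∈ arr, (-x) ∈ arr := by
    simp [hsdef, PySem.List.mem_sorted]
  by_cases hex : ∃ x ∈ arr, (-x) ∈ arr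
  · have : pvTwoPtr s 0 ((s.length : Int) - 1) = true := hfound.mpr (hmem.mpr hex)
    simp [this, hex]
  · have : pvTwoPtr s 0 ((s.length : Int) - 1) ≠ true := fun h => hex (hmem.mp (hfound.mp h))
    simp only [Bool.not_eq_true] at this
    simp [this, hex]

-- ===== VERDICT (by name: the statement is the Claim_ definition above) =====
theorem is_zero_balanced_spec : Claim_equal_is_zero_balanced := by
  intro arr _
  unfold Spec_is_zero_balanced
  rw [pvA_char, pvB_char]
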